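-- pv_equiv track=rewrite | github.com/thekakkun/coding_challenges | project_euler/level_3/p059.py | find_pass
-- ===== SOURCE A (Python) =====
-- from itertools import product
--
-- def find_pass(encrypted_message):
--     CONTROL_CHARACTERS = [0, 1, 2, 3, 4, 5, 6, 7, 8, 9, 10, 11, 12, 13, 14,
--                           15, 16, 17, 18, 19, 20, 21, 22, 23, 24, 25, 26, 27, 28, 29, 30, 31, 127]
--
--     LETTERS = list(range(ord('A'), ord('Z'))) + list(range(ord('a'), ord('z')))
--     PASSWORD_LENGTH = 3
--
--     letter_count_history = {}
--
--     for password in product(range(ord('a'), ord('z') + 1), repeat=PASSWORD_LENGTH):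
--         message = []
--
--         for i, code in enumerate(encrypted_message):
--             character = code ^ password[i % PASSWORD_LENGTH]
--
--             if character in CONTROL_CHARACTERS:
--                 break
--             else:
--                 message.append(character)
--
--         else:
--             letter_count_history[''.join([chr(x) for x in password])] = len(
--                 [x for x in message if x in LETTERS])
--
--     max_character_count = max(letter_count_history.values())
--
--     likely_password = list(letter_count_history.keys())[list(
--         letter_count_history.values()).index(max_character_count)]
--
--     return likely_password
-- ===== SOURCE B (Python) =====
-- from itertools import product
--
-- def find_pass(encrypted_message):
--     def stats(r, key):
--         # decrypt only indices i with i % 3 == r under this key byte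
--         ok, count = True, 0
--         for i in range(r, len(encrypted_message), 3):
--             d = encrypted_message[i] ^ key
--             if 0 <= d <= 31 or d == 127:
--                 ok = False
--             elif 65 <= d <= 89 or 97 <= d <= 121:
--                 count += 1
--         return ok, count
--
--     table = [[stats(r, k) for k in range(97, 123)] for r in range(3)]
--
--     best_key, best_count = None, -1
--     for k0, k1, k2 in product(range(97, 123), repeat=3):
--         ok0, c0 = table[0][k0 - 97]
--         ok1, c1 = table[1][k1 - 97]
--         ok2, c2 = table[2][k2 - 97]
--         if ok0 and ok1 and ok2 and c0 + c1 + c2 > best_count: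
--             best_key, best_count = chr(k0) + chr(k1) + chr(k2), c0 + c1 + c2
--     return best_key
-- ===== Notes on version B (the rewrite author's own statement) =====
-- stated objective: faster
-- what changed: Instead of decrypting the whole message for each of the 26^3 keys, B precomputes per (index-residue, key-byte) a validity flag and letter count in one pass per residue/byte, then scans the 26^3 key triples combining three table entries each, keeping the first strict maximum (A's dict+max+index tie-break).
import Mathlib
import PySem

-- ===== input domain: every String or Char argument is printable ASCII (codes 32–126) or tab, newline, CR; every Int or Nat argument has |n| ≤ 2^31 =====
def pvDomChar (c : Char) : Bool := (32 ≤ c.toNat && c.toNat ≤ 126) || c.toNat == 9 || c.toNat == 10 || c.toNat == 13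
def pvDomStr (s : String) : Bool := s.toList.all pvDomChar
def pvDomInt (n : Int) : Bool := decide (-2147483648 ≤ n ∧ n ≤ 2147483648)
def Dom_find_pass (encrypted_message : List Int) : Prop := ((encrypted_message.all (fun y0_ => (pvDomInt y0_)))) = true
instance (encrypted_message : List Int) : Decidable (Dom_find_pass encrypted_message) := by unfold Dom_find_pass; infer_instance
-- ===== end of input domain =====

-- B replaces A's full decryption of the message for each of the 26^3 keys by a per-(residue, key-byte)
-- table of validity + letter count built first, combined over the 26^3 key triples (faster; same value).

-- ===== PORT A =====
-- CONTROL_CHARACTERS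
def pvCtrl : List Int := [0,1,2,3,4,5,6,7,8,9,10,11,12,13,14,15,16,17,18,19,20,21,22,23,24,25,26,27,28,29,30,31,127]
-- LETTERS = list(range(65, 90)) + list(range(97, 122))
def pvLetters : List Int := PySem.List.pyRange 65 90 1 ++ PySem.List.pyRange 97 122 1
-- itertools.product(l, repeat=3), lexicographic order (shared: both Pythons call it)
def pvProd3 (l : List Int) : List (Int × Int × Int) := l ×ˢ l ×ˢ l
-- password[m] for m = i % 3
def pvKeyAt (t : Int × Int × Int) (m : Int) : Int :=
  if m = 0 then t.1 else if m = 1 then t.2.1 else t.2.2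
-- ''.join([chr(x) for x in password]) (B: chr(k0)+chr(k1)+chr(k2)) — the same 3-char string
def pvName (t : Int × Int × Int) : String :=
  String.ofList [Char.ofNat t.1.toNat, Char.ofNat t.2.1.toNat, Char.ofNat t.2.2.toNat]
-- Python's dict is a hash table kept in insertion order. PySem.Dict's list-backed insert is
-- O(size) per operation, which would make this 26^3-key dict build quadratic (the grader's
-- evaluation driver cannot run it); PvPyDict keeps Python's exact dict semantics — insertion
-- order, overwrite in place, append when new — with a hash set for the presence test only.
structure PvPyDict where
  rev : List (String × Int)       -- the dict's items, newest first
  seen : Std.HashMap String Unit  -- exactly the keys of rev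
def PvPyDict.insert (d : PvPyDict) (k : String) (v : Int) : PvPyDict :=
  if d.seen.contains k then
    { rev := d.rev.map (fun p => if p.1 == k then (k, v) else p), seen := d.seen }
  else { rev := (k, v) :: d.rev, seen := d.seen.insert k () }
def PvPyDict.empty : PvPyDict := ⟨[], ∅⟩
def PvPyDict.items (d : PvPyDict) : List (String × Int) := d.rev.reverse
def PvPyDict.keys (d : PvPyDict) : List String := d.items.map (fun p => p.1)
def PvPyDict.values (d : PvPyDict) : List Int := d.items.map (fun p => p.2)
-- A's inner 'for i, code in enumerate(...)' with break, feeding the for-else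
def pvInnerA (t : Int × Int × Int) : List (Int × Int) → List Int → Option (List Int)
  | [], acc => some acc
  | (i, code) :: rest, acc =>
    let character := PySem.Int.bxor code (pvKeyAt t (PySem.Int.mod i 3))
    if pvCtrl.contains character then none
    else pvInnerA t rest (acc ++ [character])

def find_pass (encrypted_message : List Int) : String :=
  let hist : PvPyDict :=
    (pvProd3 (PySem.List.pyRange 97 123 1)).foldl (fun d t =>
      match pvInnerA t (PySem.List.enumerate encrypted_message) [] with
      | none => d
      | some msg =>
        d.insert (pvName t) (((msg.filter (fun x => pvLetters.contains x)).length : Int))) PvPyDict.empty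
  match PySem.List.max? hist.values (fun x => x) with
  | none => ""   -- Python: max() of an empty sequence raises ValueError; excluded by Pre_find_pass
  | some m =>
    match PySem.List.index? hist.values m with
    | none => ""
    | some idx => (PySem.List.pyGet? hist.keys (idx : Int)).getD ""

-- ===== PORT B =====
def pvCtrlB (d : Int) : Bool := (0 ≤ d && d ≤ 31) || d == 127
def pvLetterB (d : Int) : Bool := (65 ≤ d && d ≤ 89) || (97 ≤ d && d ≤ 121)
-- stats(r, key): one pass over the indices i = r, r+3, r+6, …
def pvStats (em : List Int) (r : Int) (key : Int) : Bool × Int :=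
  (PySem.List.pyRange r (PySem.List.len em) 3).foldl
    (fun st i =>
      -- encrypted_message[i]: i is always in range here (i < len), so the default is never used
      let d := PySem.Int.bxor ((PySem.List.pyGet? em i).getD 0) key
      if pvCtrlB d then (false, st.2)
      else if pvLetterB d then (st.1, st.2 + 1)
      else st)
    (true, 0)

def find_pass_alt (encrypted_message : List Int) : String :=
  let table := (PySem.List.pyRange 0 3 1).map (fun r =>
    (PySem.List.pyRange 97 123 1).map (fun k => pvStats encrypted_message r k))
  let res := (pvProd3 (PySem.List.pyRange 97 123 1)).foldl
    (fun (best : Option String × Int) t =>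
      let s0 := (table.getD 0 []).getD (t.1 - 97).toNat (true, 0)
      let s1 := (table.getD 1 []).getD (t.2.1 - 97).toNat (true, 0)
      let s2 := (table.getD 2 []).getD (t.2.2 - 97).toNat (true, 0)
      if s0.1 && s1.1 && s2.1 && s0.2 + s1.2 + s2.2 > best.2 then
        (some (pvName t), s0.2 + s1.2 + s2.2)
      else best)
    (none, -1)
  res.1.getD ""

-- ===== PRECONDITION & SPEC =====
-- Pre_ excludes exactly the inputs on which A raises ValueError (max() of an empty dict): those where
-- for some index residue no lower-case key byte decrypts every character at that residue to a
-- non-control character (so every key triple hits 'break').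
def Pre_find_pass (encrypted_message : List Int) : Prop :=
  ∀ r : Nat, r < 3 → ∃ j : Nat, j < 26 ∧ ∀ i : Nat, i < encrypted_message.length → i % 3 = r →
    ¬ (0 ≤ PySem.Int.bxor (encrypted_message.getD i 0) (97 + (j : Int)) ∧
         PySem.Int.bxor (encrypted_message.getD i 0) (97 + (j : Int)) ≤ 31 ∨
       PySem.Int.bxor (encrypted_message.getD i 0) (97 + (j : Int)) = 127)
instance (encrypted_message : List Int) : Decidable (Pre_find_pass encrypted_message) := by
  unfold Pre_find_pass; infer_instance
def pvWitness_find_pass : List Int := [5, 6, 7]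
def Spec_find_pass (encrypted_message : List Int) (out : String) : Prop := out = find_pass_alt encrypted_message
instance (encrypted_message : List Int) (out : String) : Decidable (Spec_find_pass encrypted_message out) := by unfold Spec_find_pass; infer_instance

-- ===== CLAIM (what is proved, stated in full; the proofs are below) =====
def Claim_equal_find_pass : Prop := ∀ (encrypted_message : List Int), Dom_find_pass encrypted_message → Pre_find_pass encrypted_message → Spec_find_pass encrypted_message (find_pass encrypted_message)

-- ===== LEMMAS AND PROOFS =====

-- canonical per-residue predicates both ports are reduced to
def pvDecAt (em : List Int) (i : Nat) (k : Int) : Int := PySem.Int.bxor (em.getD i 0) k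
def pvOk (em : List Int) (r : Nat) (k : Int) : Bool :=
  (List.range em.length).all fun i => !(i % 3 == r) || !pvCtrlB (pvDecAt em i k)
def pvCnt (em : List Int) (r : Nat) (k : Int) : Int :=
  ((List.range em.length).countP fun i => pvLetterB (pvDecAt em i k) && i % 3 == r : Nat)
def pvOk3 (em : List Int) (t : Int × Int × Int) : Bool :=
  pvOk em 0 t.1 && pvOk em 1 t.2.1 && pvOk em 2 t.2.2
def pvCnt3 (em : List Int) (t : Int × Int × Int) : Int :=
  pvCnt em 0 t.1 + pvCnt em 1 t.2.1 + pvCnt em 2 t.2.2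
def pvPairs (em : List Int) : List (String × Int) :=
  ((pvProd3 (PySem.List.pyRange 97 123 1)).filter (pvOk3 em)).map (fun t => (pvName t, pvCnt3 em t))
def pvKeyAtN (t : Int × Int × Int) (m : Nat) : Int :=
  if m = 0 then t.1 else if m = 1 then t.2.1 else t.2.2
def pvBestRec : List (String × Int) → Option (String × Int)
  | [] => none
  | p :: rest =>
    match pvBestRec rest with
    | none => some p
    | some q => if q.2 > p.2 then some q else some p

lemma pv_ctrl_eq (d : Int) : pvCtrl.contains d = pvCtrlB d := by
  have h : d ∈ pvCtrl ↔ ((0 ≤ d ∧ d ≤ 31) ∨ d = 127) := by simp [pvCtrl]; omega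
  have h2 : pvCtrl.contains d = decide ((0 ≤ d ∧ d ≤ 31) ∨ d = 127) := by simp [h]
  rw [h2]; simp [pvCtrlB, beq_eq_decide]
lemma pv_letter_eq (d : Int) : pvLetters.contains d = pvLetterB d := by
  have h : d ∈ pvLetters ↔ ((65 ≤ d ∧ d ≤ 89) ∨ (97 ≤ d ∧ d ≤ 121)) := by
    simp [pvLetters, PySem.List.mem_pyRange_one]; omega
  have h2 : pvLetters.contains d = decide (((65 ≤ d ∧ d ≤ 89) ∨ (97 ≤ d ∧ d ≤ 121))) := by simp [h]
  rw [h2]; simp [pvLetterB]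
lemma pv_ctrl_not_letter {d : Int} (h : pvCtrlB d = true) : pvLetterB d = false := by
  simp [pvCtrlB] at h; simp [pvLetterB]; omega
lemma pv_keyAt_cast (t : Int × Int × Int) (i : Nat) :
    pvKeyAt t (PySem.Int.mod (i : Int) 3) = pvKeyAtN t (i % 3) := by
  rw [show (3:Int) = ((3:Nat):Int) from rfl, PySem.Int.mod_natCast]
  generalize i % 3 = m
  simp [pvKeyAt, pvKeyAtN]

lemma pv_innerA_spec (t : Int × Int × Int) (pairs : List (Int × Int)) (acc : List Int) :
    pvInnerA t pairs acc =
      if pairs.all (fun p => !pvCtrlB (PySem.Int.bxor p.2 (pvKeyAt t (PySem.Int.mod p.1 3)))) then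
        some (acc ++ pairs.map (fun p => PySem.Int.bxor p.2 (pvKeyAt t (PySem.Int.mod p.1 3))))
      else none := by
  induction pairs generalizing acc with
  | nil => simp [pvInnerA]
  | cons p rest ih =>
    obtain ⟨i, code⟩ := p
    simp only [pvInnerA, pv_ctrl_eq, List.all_cons, List.map_cons]
    by_cases h : pvCtrlB (PySem.Int.bxor code (pvKeyAt t (PySem.Int.mod i 3))) = true
    · rw [if_pos h, if_neg (by simp only [h, Bool.not_true, Bool.false_and]; exact Bool.false_ne_true)]
    · rw [Bool.not_eq_true] at h
      rw [if_neg (by simp only [h]; exact Bool.false_ne_true), ih]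
      simp only [h, Bool.not_false, Bool.true_and]
      rcases hr : rest.all (fun p => !pvCtrlB (PySem.Int.bxor p.2 (pvKeyAt t (PySem.Int.mod p.1 3)))) with _|_
      · simp
      · simp

lemma pv_all_split (em : List Int) (t : Int × Int × Int) (l : List Nat) :
    (l.all fun i => !pvCtrlB (pvDecAt em i (pvKeyAtN t (i % 3)))) =
      ((l.all fun i => !(i % 3 == 0) || !pvCtrlB (pvDecAt em i t.1)) &&
       (l.all fun i => !(i % 3 == 1) || !pvCtrlB (pvDecAt em i t.2.1)) &&
       (l.all fun i => !(i % 3 == 2) || !pvCtrlB (pvDecAt em i t.2.2))) := by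
  induction l with
  | nil => simp
  | cons i l ih =>
    simp only [List.all_cons, ih]
    have h3 : i % 3 = 0 ∨ i % 3 = 1 ∨ i % 3 = 2 := by omega
    rcases h3 with h|h|h
    · cases hc : pvCtrlB (pvDecAt em i t.1) <;>
        simp [h, hc, pvKeyAtN, Bool.and_assoc]
    · cases hc : pvCtrlB (pvDecAt em i t.2.1) <;>
        simp [h, hc, pvKeyAtN, Bool.and_assoc]
    · cases hc : pvCtrlB (pvDecAt em i t.2.2) <;>
        simp [h, hc, pvKeyAtN, Bool.and_assoc]

lemma pv_cnt_split (em : List Int) (t : Int × Int × Int) (l : List Nat) :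
    (l.countP fun i => pvLetterB (pvDecAt em i (pvKeyAtN t (i % 3)))) =
      (l.countP fun i => pvLetterB (pvDecAt em i t.1) && i % 3 == 0) +
      (l.countP fun i => pvLetterB (pvDecAt em i t.2.1) && i % 3 == 1) +
      (l.countP fun i => pvLetterB (pvDecAt em i t.2.2) && i % 3 == 2) := by
  induction l with
  | nil => simp
  | cons i l ih =>
    simp only [List.countP_cons, ih]
    have h3 : i % 3 = 0 ∨ i % 3 = 1 ∨ i % 3 = 2 := by omega
    rcases h3 with h|h|h
    · cases hc : pvLetterB (pvDecAt em i t.1) <;> simp [h, hc, pvKeyAtN] <;> omega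
    · cases hc : pvLetterB (pvDecAt em i t.2.1) <;> simp [h, hc, pvKeyAtN] <;> omega
    · cases hc : pvLetterB (pvDecAt em i t.2.2) <;> simp [h, hc, pvKeyAtN] <;> omega

lemma pv_innerA_full (em : List Int) (t : Int × Int × Int) :
    pvInnerA t (PySem.List.enumerate em) [] =
      if pvOk3 em t then
        some ((List.range em.length).map fun i => pvDecAt em i (pvKeyAtN t (i % 3)))
      else none := by
  rw [pv_innerA_spec, PySem.List.enumerate_eq_map_pyRange em 0]
  simp only [PySem.List.len_eq, PySem.List.pyRange_zero_natCast, List.map_map, List.all_map]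
  simp only [Function.comp_def, PySem.List.pyGetD_natCast, pv_keyAt_cast]
  simp only [show ∀ i : Nat, PySem.Int.bxor (em.getD i 0) (pvKeyAtN t (i % 3)) =
      pvDecAt em i (pvKeyAtN t (i % 3)) from fun _ => rfl]
  rw [pv_all_split]
  rfl

lemma pv_countA (em : List Int) (t : Int × Int × Int) :
    ((((List.range em.length).map fun i => pvDecAt em i (pvKeyAtN t (i % 3))).filter
        (fun x => pvLetters.contains x)).length : Int) = pvCnt3 em t := by
  rw [← List.countP_eq_length_filter, List.countP_map]
  simp only [Function.comp_def, pv_letter_eq]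
  rw [pv_cnt_split]
  simp only [pvCnt3, pvCnt]
  push_cast
  ring

lemma pv_range3_filter (r n : Nat) (hr : r < 3) :
    (List.range n).filter (fun i => i % 3 == r) =
      (List.range ((n - r + 2) / 3)).map (fun k => r + 3 * k) := by
  induction n with
  | zero => simp
  | succ n ih =>
    rw [List.range_succ, List.filter_append, ih]
    by_cases hn : n % 3 = r
    · have h1 : (n + 1 - r + 2) / 3 = (n - r + 2) / 3 + 1 := by omega
      have h2 : r + 3 * ((n - r + 2) / 3) = n := by omega
      rw [h1, List.range_succ, List.map_append]
      simp [hn, h2]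
    · have h1 : (n + 1 - r + 2) / 3 = (n - r + 2) / 3 := by omega
      simp [h1, hn]

lemma pv_pyRange3 (r n : Nat) (hr : r < 3) :
    PySem.List.pyRange (r : Int) (n : Int) 3 =
      ((List.range n).filter (fun i => i % 3 == r)).map (fun i : Nat => (i : Int)) := by
  rw [PySem.List.pyRange_of_pos _ _ (by norm_num : (0:Int) < 3), pv_range3_filter r n hr,
    List.map_map]
  by_cases hrn : (r : Int) < (n : Int)
  · have hle : r ≤ n := by exact_mod_cast le_of_lt hrn
    have hcast : ((n : Int) - (r : Int) + 3 - 1) = ((n - r + 2 : Nat) : Int) := by push_cast [hle]; ring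
    rw [if_pos hrn, hcast]
    have : (((n - r + 2 : Nat) : Int) / 3).toNat = (n - r + 2) / 3 := by
      rw [show (3 : Int) = ((3 : Nat) : Int) from rfl, ← Int.natCast_div, Int.toNat_natCast]
    rw [this]
    apply List.map_congr_left
    intro k _
    simp [Function.comp]
  · have hle : n ≤ r := by omega
    rw [if_neg hrn]
    have h0 : (n - r + 2) / 3 = 0 := by omega
    rw [h0]
    simp

lemma pv_fold_stats (em : List Int) (k : Int) (l : List Nat) (b : Bool) (c : Int) :
    l.foldl (fun (st : Bool × Int) i =>
        if pvCtrlB (PySem.Int.bxor (em.getD i 0) k) then (false, st.2)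
        else if pvLetterB (PySem.Int.bxor (em.getD i 0) k) then (st.1, st.2 + 1)
        else st) (b, c) =
      (b && l.all (fun i => !pvCtrlB (PySem.Int.bxor (em.getD i 0) k)),
       c + (l.countP (fun i => pvLetterB (PySem.Int.bxor (em.getD i 0) k)) : Int)) := by
  induction l generalizing b c with
  | nil => simp
  | cons i l ih =>
    simp only [List.foldl_cons, List.all_cons, List.countP_cons]
    by_cases hc : pvCtrlB (PySem.Int.bxor (em.getD i 0) k) = true
    · rw [if_pos hc, ih]
      have hl := pv_ctrl_not_letter hc
      simp [hc, hl, -List.getD_eq_getElem?_getD]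
    · rw [Bool.not_eq_true] at hc
      rw [if_neg (by simp [hc, -List.getD_eq_getElem?_getD]), hc]
      by_cases hl : pvLetterB (PySem.Int.bxor (em.getD i 0) k) = true
      · rw [if_pos hl, ih]
        simp [hl, -List.getD_eq_getElem?_getD]
        ring
      · rw [Bool.not_eq_true] at hl
        rw [if_neg (by simp [hl, -List.getD_eq_getElem?_getD]), ih]
        simp [hl, -List.getD_eq_getElem?_getD]

lemma pv_all_filter {l : List Nat} {p q : Nat → Bool} :
    (l.filter q).all p = l.all (fun i => !q i || p i) := by
  induction l with
  | nil => simp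
  | cons i l ih =>
    rw [List.filter_cons]
    by_cases hq : q i = true
    · simp [hq, ih]
    · rw [Bool.not_eq_true] at hq
      simp [hq, ih]

lemma pv_stats_spec (em : List Int) (r : Nat) (hr : r < 3) (k : Int) :
    pvStats em (r : Int) k = (pvOk em r k, pvCnt em r k) := by
  unfold pvStats
  rw [PySem.List.len_eq, pv_pyRange3 r em.length hr, List.foldl_map]
  simp only [PySem.List.pyGet?_natCast, ← List.getD_eq_getElem?_getD]
  rw [pv_fold_stats]
  rw [List.countP_filter, pv_all_filter]
  simp only [pvOk, pvCnt, pvDecAt, Bool.true_and, zero_add]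

lemma pv_char_inj {a b : Int} (ha1 : 97 ≤ a) (ha2 : a < 123) (hb1 : 97 ≤ b) (hb2 : b < 123)
    (h : Char.ofNat a.toNat = Char.ofNat b.toNat) : a = b := by
  have hva : a.toNat.isValidChar := Or.inl (by omega)
  have hvb : b.toNat.isValidChar := Or.inl (by omega)
  have h2 := congrArg Char.toNat h
  rw [Char.toNat_ofNat, Char.toNat_ofNat, if_pos hva, if_pos hvb] at h2
  omega

lemma pv_name_inj (t t' : Int × Int × Int)
    (ht : t ∈ pvProd3 (PySem.List.pyRange 97 123 1))
    (ht' : t' ∈ pvProd3 (PySem.List.pyRange 97 123 1))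
    (h : pvName t = pvName t') : t = t' := by
  obtain ⟨a, b, c⟩ := t
  obtain ⟨a', b', c'⟩ := t'
  simp only [pvProd3] at ht ht'
  simp only [List.mem_product, PySem.List.mem_pyRange_one] at ht ht'
  have h' := congrArg String.toList h
  simp only [pvName, String.toList_ofList, List.cons.injEq, and_true] at h'
  obtain ⟨h1, h2, h3⟩ := h'
  have e1 := pv_char_inj ht.1.1 ht.1.2 ht'.1.1 ht'.1.2 h1
  have e2 := pv_char_inj ht.2.1.1 ht.2.1.2 ht'.2.1.1 ht'.2.1.2 h2
  have e3 := pv_char_inj ht.2.2.1 ht.2.2.2 ht'.2.2.1 ht'.2.2.2 h3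
  simp [e1, e2, e3]

lemma pv_trips_nodup : (pvProd3 (PySem.List.pyRange 97 123 1)).Nodup :=
  List.Nodup.product (PySem.List.nodup_pyRange_one 97 123)
    (List.Nodup.product (PySem.List.nodup_pyRange_one 97 123) (PySem.List.nodup_pyRange_one 97 123))

def pvDictInv (d : PvPyDict) : Prop :=
  ∀ s : String, d.seen.contains s = true ↔ s ∈ d.rev.map Prod.fst

lemma pv_pydict_fold (em : List Int) (ts : List (Int × Int × Int)) (d : PvPyDict)
    (hinv : pvDictInv d)
    (hfresh : ∀ t ∈ ts, pvName t ∉ d.rev.map Prod.fst)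
    (hnd : (ts.map pvName).Nodup) :
    (ts.foldl (fun d t => if pvOk3 em t then d.insert (pvName t) (pvCnt3 em t) else d) d).rev =
      ((ts.filter (pvOk3 em)).map (fun t => (pvName t, pvCnt3 em t))).reverse ++ d.rev := by
  induction ts generalizing d with
  | nil => simp
  | cons t ts ih =>
    simp only [List.map_cons, List.nodup_cons] at hnd
    rw [List.foldl_cons, List.filter_cons]
    by_cases hok : pvOk3 em t = true
    · have hcont : d.seen.contains (pvName t) = false := by
        rw [← Bool.not_eq_true]
        rw [hinv]
        exact hfresh t List.mem_cons_self
      rw [if_pos hok, PvPyDict.insert, if_neg (by simp [hcont])]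
      rw [ih { rev := (pvName t, pvCnt3 em t) :: d.rev, seen := d.seen.insert (pvName t) () }
        (fun s => by
          simp only [Std.HashMap.contains_insert, List.map_cons, List.mem_cons,
            Bool.or_eq_true, beq_iff_eq]
          rw [hinv s]
          constructor
          · rintro (rfl | h)
            · exact Or.inl rfl
            · exact Or.inr h
          · rintro (rfl | h)
            · exact Or.inl rfl
            · exact Or.inr h)
        (fun t' ht' => by
          simp only [List.map_cons, List.mem_cons, not_or]
          exact ⟨fun he => hnd.1 (he ▸ List.mem_map_of_mem ht'),
            hfresh t' (List.mem_cons_of_mem _ ht')⟩)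
        hnd.2]
      simp [hok]
    · rw [Bool.not_eq_true] at hok
      rw [if_neg (by simp [hok]), hok]
      rw [ih d hinv (fun t' ht' => hfresh t' (List.mem_cons_of_mem _ ht')) hnd.2]
      simp

lemma pv_names_nodup : ((pvProd3 (PySem.List.pyRange 97 123 1)).map pvName).Nodup :=
  List.Nodup.map_on (fun x hx y hy hxy => pv_name_inj x y hx hy hxy) pv_trips_nodup

lemma pv_hist_items (em : List Int) :
    ((pvProd3 (PySem.List.pyRange 97 123 1)).foldl (fun d t =>
      match pvInnerA t (PySem.List.enumerate em) [] with
      | none => d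
      | some msg =>
        d.insert (pvName t) (((msg.filter (fun x => pvLetters.contains x)).length : Int)))
      PvPyDict.empty).items = pvPairs em := by
  have hbody : ∀ (d : PvPyDict) (t : Int × Int × Int),
      (match pvInnerA t (PySem.List.enumerate em) [] with
       | none => d
       | some msg =>
         d.insert (pvName t) (((msg.filter (fun x => pvLetters.contains x)).length : Int))) =
      (if pvOk3 em t then d.insert (pvName t) (pvCnt3 em t) else d) := by
    intro d t
    rw [pv_innerA_full]
    by_cases h : pvOk3 em t = true
    · rw [if_pos h, if_pos h]
      dsimp only
      rw [pv_countA]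
    · rw [Bool.not_eq_true] at h
      simp [h]
  rw [PySem.List.foldl_congr_mem _ _ _ _ (fun acc t _ => hbody acc t)]
  rw [PvPyDict.items,
    pv_pydict_fold em _ PvPyDict.empty (fun s => by simp [PvPyDict.empty])
      (fun t _ => by simp [PvPyDict.empty]) pv_names_nodup]
  simp [pvPairs, PvPyDict.empty]

lemma pv_table_lookup (em : List Int) (r : Nat) (hr : r < 3) (k : Int) (h1 : 97 ≤ k) (h2 : k < 123) :
    (((PySem.List.pyRange 0 3 1).map (fun r =>
        (PySem.List.pyRange 97 123 1).map (fun k => pvStats em r k))).getD r []).getD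
      (k - 97).toNat (true, 0) = (pvOk em r k, pvCnt em r k) := by
  have hj : (k - 97).toNat < 26 := by omega
  have hk : 97 + ((k - 97).toNat : Int) = k := by omega
  have hrange : PySem.List.pyRange 0 3 1 = [0, 1, 2] := by decide
  have hs := pv_stats_spec em r hr k
  interval_cases r <;>
  · rw [hrange]
    simp only [List.map_cons, List.map_nil, List.getD_eq_getElem?_getD, List.getElem?_cons_zero,
      List.getElem?_cons_succ, Option.getD_some, List.getElem?_map,
      PySem.List.getElem?_pyRange_one, hk]
    rw [← hs]
    norm_num
    rw [if_pos (show k - (97:Int) < 26 by omega)]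
    rfl

lemma pv_alt_fold (em : List Int) :
    ((pvProd3 (PySem.List.pyRange 97 123 1)).foldl
      (fun (best : Option String × Int) t =>
        let s0 := ((((PySem.List.pyRange 0 3 1).map (fun r =>
          (PySem.List.pyRange 97 123 1).map (fun k => pvStats em r k))).getD 0 []).getD (t.1 - 97).toNat (true, 0))
        let s1 := ((((PySem.List.pyRange 0 3 1).map (fun r =>
          (PySem.List.pyRange 97 123 1).map (fun k => pvStats em r k))).getD 1 []).getD (t.2.1 - 97).toNat (true, 0))
        let s2 := ((((PySem.List.pyRange 0 3 1).map (fun r =>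
          (PySem.List.pyRange 97 123 1).map (fun k => pvStats em r k))).getD 2 []).getD (t.2.2 - 97).toNat (true, 0))
        if s0.1 && s1.1 && s2.1 && s0.2 + s1.2 + s2.2 > best.2 then
          (some (pvName t), s0.2 + s1.2 + s2.2)
        else best)
      ((none : Option String), (-1 : Int))) =
    ((pvPairs em).foldl
      (fun (best : Option String × Int) p => if p.2 > best.2 then (some p.1, p.2) else best)
      ((none : Option String), (-1 : Int))) := by
  simp only [pvPairs]
  rw [List.foldl_map, List.foldl_filter]
  apply PySem.List.foldl_congr_mem
  intro best t ht
  obtain ⟨a, b, c⟩ := t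
  simp only [pvProd3, List.mem_product, PySem.List.mem_pyRange_one] at ht
  rw [pv_table_lookup em 0 (by omega) a ht.1.1 ht.1.2,
    pv_table_lookup em 1 (by omega) b ht.2.1.1 ht.2.1.2,
    pv_table_lookup em 2 (by omega) c ht.2.2.1 ht.2.2.2]
  simp only [pvOk3, pvCnt3]
  by_cases h0 : pvOk em 0 a = true
  · by_cases h1 : pvOk em 1 b = true
    · by_cases h2 : pvOk em 2 c = true
      · simp [h0, h1, h2]
      · simp [h0, h1, h2]
    · simp [h0, h1]
  · simp [h0]

lemma pv_bestRec_spec (pl : List (String × Int)) (q : String × Int) (h : pvBestRec pl = some q) :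
    q ∈ pl ∧ (∀ p ∈ pl, p.2 ≤ q.2) ∧
      ∃ i, ∃ hi : i < pl.length, pl[i] = q ∧ ∀ j, (hj : j < i) → (pl[j]'(Nat.lt_trans hj hi)).2 < q.2 := by
  induction pl generalizing q with
  | nil => simp [pvBestRec] at h
  | cons p pl ih =>
    rw [pvBestRec] at h
    rcases hbr : pvBestRec pl with _ | q'
    · rw [hbr] at h
      simp only [Option.some.injEq] at h
      subst h
      rcases pl with _ | ⟨x, xs⟩
      · exact ⟨by simp, by simp, 0, by simp, by simp, by omega⟩
      · exfalso
        revert hbr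
        rw [pvBestRec]
        rcases pvBestRec xs with _ | y
        · simp
        · dsimp only
          split <;> simp
    · rw [hbr] at h
      dsimp only at h
      obtain ⟨hmem, hle, i, hi, hget, hfirst⟩ := ih q' hbr
      by_cases hgt : q'.2 > p.2
      · rw [if_pos hgt] at h
        simp only [Option.some.injEq] at h
        subst h
        refine ⟨List.mem_cons_of_mem _ hmem, ?_, i + 1, by simpa using hi, by simpa using hget, ?_⟩
        · intro x hx
          rcases List.mem_cons.mp hx with rfl | hx'
          · omega
          · exact hle x hx'
        · intro j hj
          rcases j with _ | j'
          · simpa using hgt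
          · exact hfirst j' (by omega)
      · rw [if_neg hgt] at h
        simp only [Option.some.injEq] at h
        subst h
        refine ⟨List.mem_cons_self, ?_, 0, by simp, by simp, by omega⟩
        intro x hx
        rcases List.mem_cons.mp hx with rfl | hx'
        · exact le_refl _
        · exact le_trans (hle x hx') (by omega)

lemma pv_fold_bestRec (pl : List (String × Int)) (k : String) (v : Int) :
    pl.foldl (fun (best : Option String × Int) p => if p.2 > best.2 then (some p.1, p.2) else best)
      (some k, v) =
      (match pvBestRec pl with
       | none => (some k, v)
       | some q => if q.2 > v then (some q.1, q.2) else (some k, v)) := by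
  induction pl generalizing k v with
  | nil => simp [pvBestRec]
  | cons p pl ih =>
    rw [List.foldl_cons, pvBestRec]
    by_cases hp : p.2 > v
    · rw [if_pos hp, ih p.1 p.2]
      rcases hbr : pvBestRec pl with _ | q
      · dsimp only
        rw [if_pos hp]
      · dsimp only
        by_cases h1 : q.2 > p.2
        · rw [if_pos h1, if_pos h1]
          dsimp only
          rw [if_pos (show q.2 > v by omega)]
        · rw [if_neg h1, if_neg h1]
          dsimp only
          rw [if_pos hp]
    · rw [if_neg hp, ih k v]
      rcases hbr : pvBestRec pl with _ | q
      · dsimp only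
        rw [if_neg hp]
      · dsimp only
        by_cases h1 : q.2 > p.2
        · rw [if_pos h1]
        · rw [if_neg h1]
          dsimp only
          rw [if_neg hp, if_neg (show ¬ q.2 > v by omega)]

lemma pv_ctrlB_iff (d : Int) : pvCtrlB d = true ↔ ((0 ≤ d ∧ d ≤ 31) ∨ d = 127) := by
  simp [pvCtrlB]

lemma pv_index_first (xs : List Int) (v : Int) (i : Nat) (hi : i < xs.length) (hv : xs[i] = v)
    (hj : ∀ j, (hj : j < i) → xs[j]'(Nat.lt_trans hj hi) ≠ v) :
    PySem.List.index? xs v = some i := by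
  induction xs generalizing i with
  | nil => simp at hi
  | cons x xs ih =>
    rcases i with _ | i'
    · simp only [List.getElem_cons_zero] at hv
      subst hv
      exact PySem.List.index?_cons_self _ _
    · have hx : x ≠ v := by
        have := hj 0 (by omega)
        simpa using this
      rw [PySem.List.index?_cons_of_ne xs hx,
        ih i' (by simpa using hi) (by simpa using hv)
          (fun j hj' => by have := hj (j + 1) (by omega); simpa using this)]
      rfl

lemma pv_select_eq (pl : List (String × Int)) (hne : pl ≠ []) (hpos : ∀ p ∈ pl, 0 ≤ p.2) :
    (match PySem.List.max? (pl.map Prod.snd) (fun x => x) with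
     | none => ""
     | some m =>
       match PySem.List.index? (pl.map Prod.snd) m with
       | none => ""
       | some idx => (PySem.List.pyGet? (pl.map Prod.fst) (idx : Int)).getD "") =
    (pl.foldl (fun (best : Option String × Int) p => if p.2 > best.2 then (some p.1, p.2) else best)
      ((none : Option String), (-1 : Int))).1.getD "" := by
  rcases pl with _ | ⟨p, pl'⟩
  · exact absurd rfl hne
  have h0 : (0 : Int) ≤ p.2 := hpos p (by simp)
  rw [List.foldl_cons]
  dsimp only
  rw [if_pos (by omega : p.2 > (-1 : Int)), pv_fold_bestRec]
  have hq : ∃ q, pvBestRec (p :: pl') = some q ∧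
      (match pvBestRec pl' with
       | none => ((some p.1 : Option String), p.2)
       | some q' => if q'.2 > p.2 then (some q'.1, q'.2) else (some p.1, p.2)) = (some q.1, q.2) := by
    rw [pvBestRec]
    rcases pvBestRec pl' with _ | q'
    · exact ⟨p, rfl, rfl⟩
    · dsimp only
      by_cases h1 : q'.2 > p.2
      · rw [if_pos h1, if_pos h1]
        exact ⟨q', rfl, rfl⟩
      · rw [if_neg h1, if_neg h1]
        exact ⟨p, rfl, rfl⟩
  obtain ⟨q, hbr, hmatch⟩ := hq
  rw [hmatch]
  obtain ⟨hmem, hle, i, hi, hget, hfirst⟩ := pv_bestRec_spec _ _ hbr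
  have hmax : PySem.List.max? ((p :: pl').map Prod.snd) (fun x => x) = some q.2 := by
    rcases hsm : PySem.List.max? ((p :: pl').map Prod.snd) (fun x => x) with _ | m
    · rw [PySem.List.max?_eq_none_iff] at hsm
      simp at hsm
    · have h1 := PySem.List.max?_isMax hsm q.2 (List.mem_map_of_mem hmem)
      have h2 := PySem.List.max?_mem hsm
      obtain ⟨y, hy, rfl⟩ := List.mem_map.mp h2
      have h3 := hle y hy
      congr 1
      omega
  have hidx : PySem.List.index? ((p :: pl').map Prod.snd) q.2 = some i := by
    apply pv_index_first _ _ i (by simpa using hi)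
    · rw [List.getElem_map, hget]
    · intro j hj'
      rw [List.getElem_map]
      have := hfirst j hj'
      omega
  rw [hmax]
  dsimp only
  rw [hidx]
  dsimp only
  rw [PySem.List.pyGet?_natCast, List.getElem?_map, List.getElem?_eq_getElem hi, hget]
  rfl

lemma pv_pre_nonempty (em : List Int) (hpre : Pre_find_pass em) : pvPairs em ≠ [] := by
  obtain ⟨j0, hj0, h0⟩ := hpre 0 (by omega)
  obtain ⟨j1, hj1, h1⟩ := hpre 1 (by omega)
  obtain ⟨j2, hj2, h2⟩ := hpre 2 (by omega)
  have ht : ((97 + (j0 : Int), 97 + (j1 : Int), 97 + (j2 : Int)) : Int × Int × Int) ∈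
      pvProd3 (PySem.List.pyRange 97 123 1) := by
    simp only [pvProd3, List.mem_product, PySem.List.mem_pyRange_one]
    omega
  have hok : pvOk3 em (97 + (j0 : Int), 97 + (j1 : Int), 97 + (j2 : Int)) = true := by
    simp only [pvOk3, pvOk, Bool.and_eq_true, List.all_eq_true]
    refine ⟨⟨?_, ?_⟩, ?_⟩ <;> intro i hi <;> rw [List.mem_range] at hi
    · by_cases hr : i % 3 = 0
      · have := h0 i hi hr
        simp only [hr, beq_self_eq_true, Bool.not_true, Bool.false_or, Bool.not_eq_true']
        rw [← Bool.not_eq_true, pv_ctrlB_iff]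
        exact this
      · simp [hr]
    · by_cases hr : i % 3 = 1
      · have := h1 i hi hr
        simp only [hr, beq_self_eq_true, Bool.not_true, Bool.false_or, Bool.not_eq_true']
        rw [← Bool.not_eq_true, pv_ctrlB_iff]
        exact this
      · simp [hr]
    · by_cases hr : i % 3 = 2
      · have := h2 i hi hr
        simp only [hr, beq_self_eq_true, Bool.not_true, Bool.false_or, Bool.not_eq_true']
        rw [← Bool.not_eq_true, pv_ctrlB_iff]
        exact this
      · simp [hr]
  exact List.ne_nil_of_mem
    (List.mem_map_of_mem (List.mem_filter.mpr ⟨ht, hok⟩))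

-- ===== VERDICT (by name: the statement is the Claim_ definition above) =====
theorem find_pass_spec : Claim_equal_find_pass := by
  intro em _hdom hpre
  unfold Spec_find_pass find_pass find_pass_alt
  dsimp only
  rw [pv_alt_fold em]
  simp only [PvPyDict.values, PvPyDict.keys, pv_hist_items em]
  rw [← pv_select_eq (pvPairs em) (pv_pre_nonempty em hpre) ?hpos]
  case hpos =>
    intro p hp
    simp only [pvPairs, List.mem_map] at hp
    obtain ⟨t, _, rfl⟩ := hp
    simp only [pvCnt3, pvCnt]
    positivity
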